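-- pv_equiv track=rewrite | github.com/Temuujin-Natsagnyam/Algorithms | custom_encryption.py | calc_mono
-- ===== SOURCE A (Python) =====
-- def len_alpha(text):   # this counts the length of text excluding numbers
--     result = []
--     for l in text:
--         if l.isalpha() is True or l == " ":
--             result.append(l)
--     return (len(result))
--
-- def calc_mono(text):# calculates the product of the number of letters in each word e.g hi boss = 2*4
--     words = text.split()
--     z = 1
--     for x in (words):
--         y = len_alpha(x)
--         g = z * y
--         z = g
--     return z
-- ===== SOURCE B (Python) =====
-- def calc_mono(text):
--     prod = 1
--     cnt = 0
--     in_word = False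
--     for c in text:
--         if c.isspace():
--             if in_word:
--                 prod *= cnt
--                 cnt = 0
--                 in_word = False
--         else:
--             in_word = True
--             if c.isalpha():
--                 cnt += 1
--     if in_word:
--         prod *= cnt
--     return prod
-- ===== Notes on version B (the rewrite author's own statement) =====
-- stated objective: alternative
-- what changed: Replaces split()-into-words plus a per-word counting helper by a single character-level pass maintaining a running product, a current-word alpha count and an in-word flag.
import Mathlib
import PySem

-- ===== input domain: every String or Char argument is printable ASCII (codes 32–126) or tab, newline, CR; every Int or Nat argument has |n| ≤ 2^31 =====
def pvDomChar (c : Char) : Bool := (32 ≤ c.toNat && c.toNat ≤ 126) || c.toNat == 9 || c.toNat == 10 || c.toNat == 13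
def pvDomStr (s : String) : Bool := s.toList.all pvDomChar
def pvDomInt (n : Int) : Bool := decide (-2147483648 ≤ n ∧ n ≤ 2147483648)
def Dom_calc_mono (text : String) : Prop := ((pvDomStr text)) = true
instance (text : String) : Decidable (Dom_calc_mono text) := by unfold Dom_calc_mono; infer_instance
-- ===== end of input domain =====

-- B replaces split()-into-words plus a per-word counting helper by one character-level pass
-- with a running product, a current-word alpha count and an in-word flag (alternative decomposition).

-- ===== PORT A =====
def len_alpha (text : String) : Int :=
  ((text.toList.foldl
      (fun (result : List Char) l =>
        if PySem.Chars.isalpha l || l == ' ' then result ++ [l] else result) []).length : Int)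

def calc_mono (text : String) : Int :=
  let words := PySem.Str.split₀ text
  words.foldl (fun z x => z * len_alpha x) 1

-- ===== PORT B =====
def calc_mono_step (s : Int × Int × Bool) (c : Char) : Int × Int × Bool :=
  if PySem.Chars.isspace c then
    if s.2.2 then (s.1 * s.2.1, 0, false) else s
  else
    (s.1, s.2.1 + (if PySem.Chars.isalpha c then 1 else 0), true)

def calc_mono_alt (text : String) : Int :=
  let st := text.toList.foldl calc_mono_step (1, 0, false)
  if st.2.2 then st.1 * st.2.1 else st.1

-- ===== PRECONDITION & SPEC =====
def Spec_calc_mono (text : String) (out : Int) : Prop := out = calc_mono_alt text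
instance (text : String) (out : Int) : Decidable (Spec_calc_mono text out) := by unfold Spec_calc_mono; infer_instance

-- ===== CLAIM (what is proved, stated in full; the proofs are below) =====
def Claim_equal_calc_mono : Prop := ∀ (text : String), Dom_calc_mono text → Spec_calc_mono text (calc_mono text)

-- ===== LEMMAS AND PROOFS =====
def pvPa (c : Char) : Bool := PySem.Chars.isalpha c || c == ' '

def pvF (z : Int) (w : List Char) : Int := z * ((w.filter pvPa).length : Int)

def pvAcnt (cur : List Char) : Int := ((cur.filter PySem.Chars.isalpha).length : Int)

def pvFinish (s : Int × Int × Bool) : Int := if s.2.2 then s.1 * s.2.1 else s.1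

lemma go_nil (cur : List Char) (acc : List (List Char)) :
    PySem.Chars.split₀.go [] cur acc =
      if cur.isEmpty then acc.reverse else (cur.reverse :: acc).reverse := rfl

lemma go_cons (c : Char) (rest cur : List Char) (acc : List (List Char)) :
    PySem.Chars.split₀.go (c :: rest) cur acc =
      if PySem.Chars.isspace c then
        (if cur.isEmpty then PySem.Chars.split₀.go rest [] acc
         else PySem.Chars.split₀.go rest [] (cur.reverse :: acc))
      else PySem.Chars.split₀.go rest (c :: cur) acc := rfl

lemma go_acc (rest : List Char) : ∀ (cur : List Char) (acc : List (List Char)),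
    PySem.Chars.split₀.go rest cur acc = acc.reverse ++ PySem.Chars.split₀.go rest cur [] := by
  induction rest with
  | nil =>
      intro cur acc
      rw [go_nil, go_nil]
      by_cases he : cur.isEmpty <;> simp [he]
  | cons c rest ih =>
      intro cur acc
      rw [go_cons, go_cons]
      by_cases hs : PySem.Chars.isspace c
      · rw [if_pos hs, if_pos hs]
        by_cases he : cur.isEmpty
        · rw [if_pos he, if_pos he, ih [] acc]
        · rw [if_neg he, if_neg he, ih [] (cur.reverse :: acc), ih [] [cur.reverse]]
          simp
      · rw [if_neg hs, if_neg hs, ih (c :: cur) acc]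

lemma filter_pa_nospace (cur : List Char) (h : ∀ c ∈ cur, PySem.Chars.isspace c = false) :
    cur.filter pvPa = cur.filter PySem.Chars.isalpha := by
  apply List.filter_congr
  intro c hc
  by_cases h' : c = ' '
  · exfalso
    have hns := h c hc
    subst h'
    simp [PySem.Chars.isspace] at hns
  · simp [pvPa, h']

lemma pvF_reverse_nospace (z : Int) (cur : List Char)
    (h : ∀ c ∈ cur, PySem.Chars.isspace c = false) :
    pvF z cur.reverse = z * pvAcnt cur := by
  unfold pvF pvAcnt
  rw [List.filter_reverse, List.length_reverse, filter_pa_nospace cur h]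

lemma main_inv (rest : List Char) : ∀ (cur : List Char) (z : Int),
    (∀ c ∈ cur, PySem.Chars.isspace c = false) →
    pvFinish (rest.foldl calc_mono_step (z, pvAcnt cur, !cur.isEmpty)) =
      List.foldl pvF z (PySem.Chars.split₀.go rest cur []) := by
  induction rest with
  | nil =>
      intro cur z h
      rw [go_nil]
      cases cur with
      | nil => simp [pvFinish, pvAcnt]
      | cons d ds =>
          simp only [List.isEmpty_cons, List.foldl_nil, Bool.false_eq_true, if_false,
            pvFinish, Bool.not_false, if_true]
          rw [show [(d :: ds).reverse].reverse = [(d :: ds).reverse] from rfl,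
            List.foldl_cons, List.foldl_nil, pvF_reverse_nospace z (d :: ds) h]
  | cons c rest ih =>
      intro cur z h
      rw [go_cons, List.foldl_cons]
      by_cases hs : PySem.Chars.isspace c
      · rw [if_pos hs]
        cases cur with
        | nil =>
            rw [if_pos (show (([] : List Char).isEmpty) = true from rfl)]
            have hstep : calc_mono_step (z, pvAcnt ([] : List Char), !([] : List Char).isEmpty) c
                = (z, pvAcnt ([] : List Char), !([] : List Char).isEmpty) := by
              simp [calc_mono_step, hs]
            rw [hstep]
            exact ih [] z (by simp)
        | cons d ds =>
            rw [if_neg (by simp)]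
            have hstep : calc_mono_step (z, pvAcnt (d :: ds), !(d :: ds).isEmpty) c
                = (z * pvAcnt (d :: ds), 0, false) := by
              simp [calc_mono_step, hs]
            rw [hstep, go_acc rest [] [(d :: ds).reverse]]
            have h2 := ih [] (z * pvAcnt (d :: ds)) (by simp)
            simp only [pvAcnt, List.filter_nil, List.length_nil, List.isEmpty_nil,
              Bool.not_true, Nat.cast_zero] at h2 ⊢
            rw [List.reverse_singleton, List.singleton_append, List.foldl_cons,
              pvF_reverse_nospace z (d :: ds) h]
            exact h2
      · rw [if_neg hs]
        have hstep : calc_mono_step (z, pvAcnt cur, !cur.isEmpty) c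
            = (z, pvAcnt (c :: cur), !(c :: cur).isEmpty) := by
          simp only [calc_mono_step, hs, if_false, Bool.false_eq_true, List.isEmpty_cons,
            Bool.not_false]
          by_cases ha : PySem.Chars.isalpha c <;>
            simp [pvAcnt, ha]
        rw [hstep]
        exact ih (c :: cur) z (by
          intro x hx
          rcases List.mem_cons.mp hx with h' | h'
          · subst h'; simpa using hs
          · exact h x h')

lemma len_alpha_ofList (w : List Char) :
    len_alpha (String.ofList w) = ((w.filter pvPa).length : Int) := by
  unfold len_alpha
  rw [String.toList_ofList]
  rw [show (fun (result : List Char) l =>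
        if PySem.Chars.isalpha l || l == ' ' then result ++ [l] else result)
      = (fun (result : List Char) l => if pvPa l then result ++ [l] else result) from rfl]
  rw [PySem.List.foldl_append_if_eq_filter]
  simp

-- ===== VERDICT (by name: the statement is the Claim_ definition above) =====
theorem calc_mono_spec : Claim_equal_calc_mono := by
  intro text _
  unfold Spec_calc_mono calc_mono calc_mono_alt
  have h := main_inv text.toList [] 1 (by simp)
  simp only [pvAcnt, List.filter_nil, List.length_nil, List.isEmpty_nil, Bool.not_true,
    Nat.cast_zero] at h
  rw [PySem.Str.split₀, PySem.Chars.split₀, List.foldl_map]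
  have hfun : (fun (z : Int) (x : List Char) => z * len_alpha (String.ofList x)) = pvF := by
    funext z x
    rw [len_alpha_ofList]; rfl
  simp only [hfun]
  rw [← h]
  rfl
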